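-- pv_equiv track=rewrite | github.com/armpit-symphony/bugbounty-swarm | core/tech_router.py | route_playbooks
-- ===== SOURCE A (Python) =====
-- TECH_TO_PLAYBOOKS = {
--     "next.js": ["auth", "ssrf", "idor", "xss"],
--     "react": ["xss", "auth"],
--     "angular": ["xss", "auth"],
--     "vue": ["xss", "auth"],
--     "django": ["sqli", "auth", "idor"],
--     "flask": ["sqli", "auth", "idor"],
--     "express": ["auth", "ssrf", "idor"],
--     "laravel": ["sqli", "auth", "idor"],
--     "wordpress": ["auth", "idor", "xss"],
-- }
--
-- def route_playbooks(tech_list: list[str]) -> list[str]: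
--     selected = []
--     for t in tech_list:
--         key = t.lower()
--         for tech_key, pbs in TECH_TO_PLAYBOOKS.items():
--             if tech_key in key:
--                 for pb in pbs:
--                     if pb not in selected:
--                         selected.append(pb)
--     if not selected:
--         selected = ["xss", "sqli", "auth", "idor"]
--     return selected
-- ===== SOURCE B (Python) =====
-- TECH_TO_PLAYBOOKS = {
--     "next.js": ["auth", "ssrf", "idor", "xss"],
--     "react": ["xss", "auth"],
--     "angular": ["xss", "auth"],
--     "vue": ["xss", "auth"],
--     "django": ["sqli", "auth", "idor"],
--     "flask": ["sqli", "auth", "idor"],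
--     "express": ["auth", "ssrf", "idor"],
--     "laravel": ["sqli", "auth", "idor"],
--     "wordpress": ["auth", "idor", "xss"],
-- }
--
-- # every playbook the table can ever emit
-- ALL_PLAYBOOKS = ["auth", "ssrf", "idor", "xss", "sqli"]
--
-- def route_playbooks(tech_list: list[str]) -> list[str]:
--     # collect the raw match stream (duplicates and all), then pick, from the
--     # fixed universe of playbooks, those that occur, ranked by first occurrence
--     stream = [pb
--               for t in tech_list
--               for tech_key, pbs in TECH_TO_PLAYBOOKS.items()
--               if tech_key in t.lower()
--               for pb in pbs]
--     ranked = sorted((pb for pb in ALL_PLAYBOOKS if pb in stream),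
--                     key=stream.index)
--     return ranked if ranked else ["xss", "sqli", "auth", "idor"]
-- ===== Notes on version B (the rewrite author's own statement) =====
-- stated objective: alternative
-- what changed: Instead of A's fused scan that dedups with a membership guard on every append, B collects the raw match stream (duplicates kept) and then selects from the fixed five-playbook universe the ones that occur, ordering them by a sort keyed on first occurrence (stream.index).
import Mathlib
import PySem

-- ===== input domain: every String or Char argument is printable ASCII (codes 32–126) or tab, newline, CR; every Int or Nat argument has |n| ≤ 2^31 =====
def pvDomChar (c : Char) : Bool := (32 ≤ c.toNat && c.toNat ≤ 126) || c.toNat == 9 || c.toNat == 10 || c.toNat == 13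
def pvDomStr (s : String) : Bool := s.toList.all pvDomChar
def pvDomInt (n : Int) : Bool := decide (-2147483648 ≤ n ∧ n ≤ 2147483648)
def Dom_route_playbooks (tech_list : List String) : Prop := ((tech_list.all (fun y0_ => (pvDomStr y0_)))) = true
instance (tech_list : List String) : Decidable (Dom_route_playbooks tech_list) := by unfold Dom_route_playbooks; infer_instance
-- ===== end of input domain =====

-- B collects the raw match stream and then selects, from the fixed five-playbook
-- universe, those present, ranked by first occurrence via a sort — instead of A's
-- fused scan that dedups with a membership guard on every append: alternative decomposition.

def TECH_TO_PLAYBOOKS : List (String × List String) :=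
  [("next.js", ["auth", "ssrf", "idor", "xss"]),
   ("react", ["xss", "auth"]),
   ("angular", ["xss", "auth"]),
   ("vue", ["xss", "auth"]),
   ("django", ["sqli", "auth", "idor"]),
   ("flask", ["sqli", "auth", "idor"]),
   ("express", ["auth", "ssrf", "idor"]),
   ("laravel", ["sqli", "auth", "idor"]),
   ("wordpress", ["auth", "idor", "xss"])]

-- ===== PORT A =====
def route_playbooks (tech_list : List String) : List String :=
  let selected : List String := tech_list.foldl (fun selected t =>
    let key := PySem.Str.lower t
    TECH_TO_PLAYBOOKS.foldl (fun selected p =>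
      if PySem.Str.isIn p.1 key then
        p.2.foldl (fun selected pb =>
          if selected.contains pb then selected else selected ++ [pb]) selected
      else selected) selected) []
  if selected = [] then ["xss", "sqli", "auth", "idor"] else selected

-- ===== PORT B =====
def ALL_PLAYBOOKS : List String := ["auth", "ssrf", "idor", "xss", "sqli"]

def route_playbooks_alt (tech_list : List String) : List String :=
  let stream : List String := tech_list.flatMap (fun t =>
    TECH_TO_PLAYBOOKS.flatMap (fun p =>
      if PySem.Str.isIn p.1 (PySem.Str.lower t) then p.2 else []))
  -- stream.index pb: every kept pb is in stream, so index? is some there; getD 0 is exact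
  let ranked := PySem.List.sorted (ALL_PLAYBOOKS.filter (fun pb => stream.contains pb))
                  (fun pb => (PySem.List.index? stream pb).getD 0) false
  if ranked = [] then ["xss", "sqli", "auth", "idor"] else ranked

-- ===== PRECONDITION & SPEC =====
def Spec_route_playbooks (tech_list : List String) (out : List String) : Prop := out = route_playbooks_alt tech_list
instance (tech_list : List String) (out : List String) : Decidable (Spec_route_playbooks tech_list out) := by unfold Spec_route_playbooks; infer_instance

-- ===== CLAIM (what is proved, stated in full; the proofs are below) =====
def Claim_equal_route_playbooks : Prop := ∀ (tech_list : List String), Dom_route_playbooks tech_list → Spec_route_playbooks tech_list (route_playbooks tech_list)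

-- ===== LEMMAS AND PROOFS =====

-- A's guarded-append inner fold over one matching entry, then over the whole table,
-- equals a single fold of the same step over the flattened match list.
theorem rp_inner (t : String) :
    ∀ (L : List (String × List String)) (sel : List String),
      L.foldl (fun selected p =>
        if PySem.Str.isIn p.1 (PySem.Str.lower t) then
          p.2.foldl (fun selected pb =>
            if selected.contains pb then selected else selected ++ [pb]) selected
        else selected) sel
      = (L.flatMap (fun p =>
          if PySem.Str.isIn p.1 (PySem.Str.lower t) then p.2 else [])).foldl
            (fun selected pb =>
              if selected.contains pb then selected else selected ++ [pb]) sel := by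
  intro L
  induction L with
  | nil => intro sel; rfl
  | cons p L ih =>
      intro sel
      rw [List.foldl_cons, List.flatMap_cons, List.foldl_append, ih]
      congr 1
      split <;> rfl

-- The whole nested loop of A equals one fold of the guarded-append step over the flat stream.
theorem rp_outer :
    ∀ (tl : List String) (sel : List String),
      tl.foldl (fun selected t =>
        TECH_TO_PLAYBOOKS.foldl (fun selected p =>
          if PySem.Str.isIn p.1 (PySem.Str.lower t) then
            p.2.foldl (fun selected pb =>
              if selected.contains pb then selected else selected ++ [pb]) selected
          else selected) selected) sel
      = (tl.flatMap (fun t => TECH_TO_PLAYBOOKS.flatMap (fun p =>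
          if PySem.Str.isIn p.1 (PySem.Str.lower t) then p.2 else []))).foldl
            (fun selected pb =>
              if selected.contains pb then selected else selected ++ [pb]) sel := by
  intro tl
  induction tl with
  | nil => intro sel; rfl
  | cons t tl ih =>
      intro sel
      rw [List.foldl_cons, ih, rp_inner, List.flatMap_cons, List.foldl_append]

-- A's accumulator is the ordered dedup of the stream.
theorem rp_A_eq_dedup (tl : List String) :
    route_playbooks tl
    = (let stream := tl.flatMap (fun t => TECH_TO_PLAYBOOKS.flatMap (fun p =>
         if PySem.Str.isIn p.1 (PySem.Str.lower t) then p.2 else []))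
       if PySem.List.dedup stream = [] then ["xss", "sqli", "auth", "idor"]
       else PySem.List.dedup stream) := by
  simp only [route_playbooks]
  rw [rp_outer, PySem.List.dedup_eq_ofList, PySem.Set.ofList_eq_foldl]
  rfl

-- every stream element lies in the fixed playbook universe
theorem stream_subset_all (tl : List String) (pb : String)
    (h : pb ∈ tl.flatMap (fun t => TECH_TO_PLAYBOOKS.flatMap (fun p =>
          if PySem.Str.isIn p.1 (PySem.Str.lower t) then p.2 else []))) :
    pb ∈ ALL_PLAYBOOKS := by
  rcases List.mem_flatMap.1 h with ⟨t, _, ht⟩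
  rcases List.mem_flatMap.1 ht with ⟨p, hp, hpb⟩
  have hpb2 : pb ∈ p.2 := by
    simp at hpb
    exact hpb.2
  revert hpb2
  have : ∀ q ∈ TECH_TO_PLAYBOOKS, ∀ x ∈ q.2, x ∈ ALL_PLAYBOOKS := by decide
  exact this p hp pb

-- members of xs have a first index below xs.length
theorem idx_lt_length {xs : List String} {a : String} (h : a ∈ xs) :
    (PySem.List.index? xs a).getD 0 < xs.length := by
  rcases Option.isSome_iff_exists.1 ((PySem.List.index?_isSome_iff _ _).2 h) with ⟨k, hk⟩
  rcases PySem.List.getElem_of_index?_eq_some hk with ⟨hlt, _, _⟩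
  rw [hk]
  simpa using hlt

-- the ordered dedup of xs is strictly increasing under the first-index key
theorem dedup_pairwise_idx (xs : List String) :
    (PySem.List.dedup xs).Pairwise
      (fun a b => (PySem.List.index? xs a).getD 0 < (PySem.List.index? xs b).getD 0) := by
  induction xs using List.reverseRecOn with
  | nil => simp [PySem.List.dedup]
  | append_singleton xs c ih =>
      have hof : PySem.List.dedup (xs ++ [c])
          = if c ∈ PySem.List.dedup xs then PySem.List.dedup xs
            else PySem.List.dedup xs ++ [c] := by
        simp only [PySem.List.dedup_eq_ofList, PySem.Set.ofList_eq_foldl,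
          List.foldl_append, List.foldl_cons, List.foldl_nil]
        by_cases hc : c ∈ PySem.Set.ofList xs <;>
          simp [PySem.Set.add]
      have hmem : ∀ a, a ∈ PySem.List.dedup xs → a ∈ xs := fun a ha =>
        (PySem.List.mem_dedup _ _).1 ha
      have hkey : ∀ a ∈ xs,
          (PySem.List.index? (xs ++ [c]) a).getD 0 = (PySem.List.index? xs a).getD 0 := by
        intro a ha
        rw [PySem.List.index?_append_of_mem _ ha]
      have hbase : (PySem.List.dedup xs).Pairwise
          (fun a b => (PySem.List.index? (xs ++ [c]) a).getD 0
                    < (PySem.List.index? (xs ++ [c]) b).getD 0) := by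
        refine ih.imp_of_mem ?_
        intro a b ha hb hab
        rw [hkey a (hmem a ha), hkey b (hmem b hb)]
        exact hab
      rw [hof]
      by_cases hc : c ∈ PySem.List.dedup xs
      · rw [if_pos hc]; exact hbase
      · have hcx : c ∉ xs := fun h => hc ((PySem.List.mem_dedup _ _).2 h)
        simp only [hc, if_false]
        refine List.pairwise_append.2 ⟨hbase, List.pairwise_singleton _ _, ?_⟩
        intro a ha b hb
        have hb' : b = c := by simpa using hb
        subst hb'
        rw [hkey a (hmem a ha), PySem.List.index?_append_singleton_self xs b hcx]
        simpa using idx_lt_length (hmem a ha)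

-- B's select-and-sort equals the ordered dedup of the stream
theorem ranked_eq_dedup (stream : List String)
    (hsub : ∀ pb ∈ stream, pb ∈ ALL_PLAYBOOKS) :
    PySem.List.sorted (ALL_PLAYBOOKS.filter (fun pb => stream.contains pb))
      (fun pb => (PySem.List.index? stream pb).getD 0) false
    = PySem.List.dedup stream := by
  apply PySem.List.sorted_eq_of_perm_of_pairwise_lt
  · apply (List.perm_ext_iff_of_nodup (PySem.List.nodup_dedup _)
      (List.Nodup.filter _ (by decide : ALL_PLAYBOOKS.Nodup))).2
    intro a
    simp only [PySem.List.mem_dedup, List.mem_filter, List.contains_iff_mem]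
    exact ⟨fun ha => ⟨hsub a ha, by simpa using ha⟩, fun h => by simpa using h.2⟩
  · exact dedup_pairwise_idx stream

-- ===== VERDICT (by name: the statement is the Claim_ definition above) =====
theorem route_playbooks_spec : Claim_equal_route_playbooks := by
  intro tech_list _
  show route_playbooks tech_list = route_playbooks_alt tech_list
  rw [rp_A_eq_dedup]
  simp only [route_playbooks_alt]
  rw [ranked_eq_dedup _ (stream_subset_all tech_list)]
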